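-- pv_equiv track=rewrite | github.com/krahulgs/AstroPinch | backend/services/phillips_numerology.py | calculate_challenges
-- ===== SOURCE A (Python) =====
-- MASTER_NUMBERS = {11, 22, 33}
--
-- KARMIC_DEBT_NUMBERS = {13, 14, 16, 19}
--
-- def reduce_to_single_digit(number, keep_master=True, track_karmic=False):
--     """
--     Reduce number to single digit, preserving master numbers and tracking karmic debt
--     Returns: (final_number, has_karmic_debt)
--     """
--     original = number
--     has_karmic = False
--
--     while number > 9:
--         if keep_master and number in MASTER_NUMBERS:
--             return (number, has_karmic)
--         if track_karmic and number in KARMIC_DEBT_NUMBERS: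
--             has_karmic = True
--         number = sum(int(digit) for digit in str(number))
--
--     return (number, has_karmic)
--
-- def calculate_challenges(year, month, day):
--     """
--     Calculate four Challenge Numbers from birth date
--     Challenges represent obstacles to overcome
--     """
--     month_reduced, _ = reduce_to_single_digit(month, keep_master=False)
--     day_reduced, _ = reduce_to_single_digit(day, keep_master=False)
--     year_reduced, _ = reduce_to_single_digit(sum(int(d) for d in str(year)), keep_master=False)
--
--     # First Challenge: |month - day|
--     challenge1 = abs(month_reduced - day_reduced)
--
--     # Second Challenge: |day - year|
--     challenge2 = abs(day_reduced - year_reduced)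
--
--     # Third Challenge: |challenge1 - challenge2|
--     challenge3 = abs(challenge1 - challenge2)
--
--     # Fourth Challenge: |month - year|
--     challenge4 = abs(month_reduced - year_reduced)
--
--     return {
--         "first": challenge1,
--         "second": challenge2,
--         "third": challenge3,
--         "fourth": challenge4
--     }
-- ===== SOURCE B (Python) =====
-- def calculate_challenges(year, month, day):
--     # Closed-form digital root replaces the digit-summing while-loop.
--     def digital_root(n):
--         return n if n <= 9 else 1 + (n - 1) % 9
--
--     month_reduced = digital_root(month)
--     day_reduced = digital_root(day)
--     year_reduced = digital_root(year)
--
--     challenge1 = abs(month_reduced - day_reduced)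
--     challenge2 = abs(day_reduced - year_reduced)
--     challenge3 = abs(challenge1 - challenge2)
--     challenge4 = abs(month_reduced - year_reduced)
--
--     return {
--         "first": challenge1,
--         "second": challenge2,
--         "third": challenge3,
--         "fourth": challenge4,
--     }
-- ===== Notes on version B (the rewrite author's own statement) =====
-- stated objective: simpler
-- what changed: The while-loop that repeatedly sums decimal digits (via str conversion) is replaced by the closed-form digital root 1 + (n - 1) % 9, so no string conversion or loop remains.
-- outside the precondition, e.g. on calculate_challenges(-5, 1, 2): A raises ValueError, B returns {'first': 1, 'second': 7, 'third': 6, 'fourth': 6}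
import Mathlib
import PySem

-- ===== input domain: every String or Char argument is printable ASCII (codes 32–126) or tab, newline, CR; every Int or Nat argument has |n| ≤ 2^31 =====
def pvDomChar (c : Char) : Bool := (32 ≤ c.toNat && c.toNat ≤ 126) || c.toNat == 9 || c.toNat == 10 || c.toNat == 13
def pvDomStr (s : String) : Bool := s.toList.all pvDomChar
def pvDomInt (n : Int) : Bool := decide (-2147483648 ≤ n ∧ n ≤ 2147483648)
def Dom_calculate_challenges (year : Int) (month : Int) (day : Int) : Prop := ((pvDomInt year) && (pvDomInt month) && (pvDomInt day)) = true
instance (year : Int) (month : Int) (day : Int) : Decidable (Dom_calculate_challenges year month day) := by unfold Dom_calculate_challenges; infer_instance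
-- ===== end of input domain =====

-- B replaces A's digit-summing while-loop by the closed-form digital root 1 + (n-1) % 9 (objective: simpler).

-- ===== PORT A =====
def MASTER_NUMBERS : List Int := [11, 22, 33]
def KARMIC_DEBT_NUMBERS : List Int := [13, 14, 16, 19]

-- sum(int(digit) for digit in str(number)); int('-') would be none, Pre_ keeps year ≥ 0
def strDigitSum (n : Int) : Int :=
  ((PySem.Int.toChars n).map (fun c => (PySem.Int.ofChars? [c]).getD 0)).sum

theorem toDigitsCore_eq (f : Nat) : ∀ (n : Nat) (ds : List Char), n < f → 0 < n →
    Nat.toDigitsCore 10 f n ds = ((Nat.digits 10 n).map Nat.digitChar).reverse ++ ds := by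
  induction f with
  | zero => intro n ds h; omega
  | succ f ih =>
    intro n ds h hn
    rw [Nat.digits_def' (by norm_num : 1 < 10) hn]
    simp only [Nat.toDigitsCore, List.map_cons, List.reverse_cons]
    by_cases h0 : n / 10 = 0
    · simp [h0, Nat.digits_zero]
    · rw [if_neg h0, ih (n / 10) _ (by omega) (by omega)]
      simp

theorem strDigitSum_natCast (m : Nat) :
    strDigitSum (m : Int) = ((Nat.digits 10 m).sum : Int) := by
  rcases Nat.eq_zero_or_pos m with hm | hm
  · subst hm; decide
  · unfold strDigitSum
    rw [show PySem.Int.toChars (m : Int) = Nat.toDigits 10 m by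
      simp [PySem.Int.toChars, Int.toNat_natCast, show ¬((m:Int) < 0) by omega]]
    rw [Nat.toDigits, toDigitsCore_eq (m+1) m [] (by omega) hm]
    rw [List.append_nil, List.map_reverse, List.sum_reverse, List.map_map]
    have hcongr : List.map ((fun c => (PySem.Int.ofChars? [c]).getD 0) ∘ Nat.digitChar)
        (Nat.digits 10 m) = List.map (fun d : Nat => (d : Int)) (Nat.digits 10 m) :=
      List.map_congr_left (fun d hd => by
        have : d < 10 := Nat.digits_lt_base (by norm_num) hd
        interval_cases d <;> decide)
    rw [hcongr]
    exact (Nat.cast_list_sum _).symm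

-- termination lemma for the while-loop below (cited by name in decreasing_by)
theorem strDigitSum_lt_self (n : Int) (h : 9 < n) :
    0 ≤ strDigitSum n ∧ strDigitSum n < n := by
  have hm : n = (n.toNat : Int) := by omega
  rw [hm, strDigitSum_natCast]
  have hle := Nat.digit_sum_le 10 n.toNat
  rw [Nat.digits_def' (by norm_num : 1 < 10) (by omega)]
  have hle2 := Nat.digit_sum_le 10 (n.toNat / 10)
  simp only [List.sum_cons]
  omega

-- the `while number > 9` loop of reduce_to_single_digit, carrying (number, has_karmic)
def reduceLoop (number : Int) (keep_master : Bool) (track_karmic : Bool) (has_karmic : Bool) : Int × Bool :=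
  if h : 9 < number then
    if keep_master && MASTER_NUMBERS.contains number then (number, has_karmic)
    else
      reduceLoop (strDigitSum number) keep_master track_karmic
        (if track_karmic && KARMIC_DEBT_NUMBERS.contains number then true else has_karmic)
  else (number, has_karmic)
termination_by number.toNat
decreasing_by
  have := strDigitSum_lt_self number h
  omega

def reduce_to_single_digit (number : Int) (keep_master : Bool) (track_karmic : Bool) : Int × Bool :=
  reduceLoop number keep_master track_karmic false

def calculate_challenges (year : Int) (month : Int) (day : Int) : List (String × Int) :=
  let month_reduced := (reduce_to_single_digit month false false).1
  let day_reduced := (reduce_to_single_digit day false false).1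
  let year_reduced := (reduce_to_single_digit (strDigitSum year) false false).1
  let challenge1 := |month_reduced - day_reduced|
  let challenge2 := |day_reduced - year_reduced|
  let challenge3 := |challenge1 - challenge2|
  let challenge4 := |month_reduced - year_reduced|
  [("first", challenge1), ("second", challenge2), ("third", challenge3), ("fourth", challenge4)]

-- ===== PORT B =====
def digital_root (n : Int) : Int := if n ≤ 9 then n else 1 + PySem.Int.mod (n - 1) 9

def calculate_challenges_alt (year : Int) (month : Int) (day : Int) : List (String × Int) :=
  let month_reduced := digital_root month
  let day_reduced := digital_root day
  let year_reduced := digital_root year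
  let challenge1 := |month_reduced - day_reduced|
  let challenge2 := |day_reduced - year_reduced|
  let challenge3 := |challenge1 - challenge2|
  let challenge4 := |month_reduced - year_reduced|
  [("first", challenge1), ("second", challenge2), ("third", challenge3), ("fourth", challenge4)]

-- ===== PRECONDITION & SPEC =====
-- Pre_ excludes year < 0, on which A raises ValueError (str(year) starts with '-' and int('-') fails).
def Pre_calculate_challenges (year : Int) (month : Int) (day : Int) : Prop := 0 ≤ year
instance (year : Int) (month : Int) (day : Int) : Decidable (Pre_calculate_challenges year month day) := by unfold Pre_calculate_challenges; infer_instance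
def pvWitness_calculate_challenges : Int × Int × Int := (1990, 7, 25)

def Spec_calculate_challenges (year : Int) (month : Int) (day : Int) (out : List (String × Int)) : Prop := out = calculate_challenges_alt year month day
instance (year : Int) (month : Int) (day : Int) (out : List (String × Int)) : Decidable (Spec_calculate_challenges year month day out) := by unfold Spec_calculate_challenges; infer_instance

-- ===== CLAIM (what is proved, stated in full; the proofs are below) =====
def Claim_equal_calculate_challenges : Prop := ∀ (year : Int) (month : Int) (day : Int), Dom_calculate_challenges year month day → Pre_calculate_challenges year month day → Spec_calculate_challenges year month day (calculate_challenges year month day)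

-- ===== LEMMAS AND PROOFS =====

-- Nat.toDigitsCore writes out the base-10 digits (most significant first)


theorem digits_sum_pos (n : Nat) (h : 0 < n) : 0 < (Nat.digits 10 n).sum := by
  induction n using Nat.strong_induction_on with
  | _ n ih =>
    rw [Nat.digits_def' (by norm_num : 1 < 10) h]
    simp only [List.sum_cons]
    rcases Nat.eq_zero_or_pos (n % 10) with h0 | h0
    · have h10 : 0 < n / 10 := by omega
      have := ih (n / 10) (by omega) h10
      omega
    · omega

theorem digital_root_congr (a b : Nat) (ha : 0 < a) (hb : 0 < b) (h : a % 9 = b % 9) :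
    digital_root (a : Int) = digital_root (b : Int) := by
  have h' : (a : Int) % 9 = (b : Int) % 9 := by omega
  unfold digital_root
  rw [PySem.Int.mod_eq_emod_of_pos (by norm_num), PySem.Int.mod_eq_emod_of_pos (by norm_num)]
  split_ifs <;> omega

theorem digital_root_strDigitSum (n : Int) (h : 0 ≤ n) :
    digital_root (strDigitSum n) = digital_root n := by
  have hm : n = (n.toNat : Int) := by omega
  rcases Nat.eq_zero_or_pos n.toNat with h0 | h0
  · rw [hm, h0]; decide
  · rw [hm, strDigitSum_natCast]
    exact digital_root_congr _ _ (digits_sum_pos _ h0) h0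
      ((Nat.modEq_digits_sum 9 10 (by norm_num) n.toNat).symm)

theorem reduceLoop_eq (N : Nat) : ∀ (n : Int), n.toNat ≤ N → ∀ (k : Bool),
    reduceLoop n false false k = (digital_root n, k) := by
  induction N with
  | zero =>
    intro n hn k
    rw [reduceLoop, digital_root]
    rw [dif_neg (by omega), if_pos (by omega)]
  | succ N ih =>
    intro n hn k
    by_cases h9 : 9 < n
    · have hs := strDigitSum_lt_self n h9
      rw [reduceLoop, dif_pos h9]
      simp only [Bool.false_and, Bool.false_eq_true, if_false]
      rw [ih (strDigitSum n) (by omega) k]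
      rw [digital_root_strDigitSum n (by omega), digital_root, if_neg (by omega)]
    · rw [reduceLoop, dif_neg h9, digital_root, if_pos (by omega)]

-- ===== VERDICT (by name: the statement is the Claim_ definition above) =====
theorem calculate_challenges_spec : Claim_equal_calculate_challenges := by
  intro year month day _ hpre
  unfold Spec_calculate_challenges calculate_challenges calculate_challenges_alt
    reduce_to_single_digit
  rw [reduceLoop_eq month.toNat month le_rfl, reduceLoop_eq day.toNat day le_rfl,
    reduceLoop_eq (strDigitSum year).toNat _ le_rfl,
    digital_root_strDigitSum year hpre]
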